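-- pv_equiv track=rewrite | github.com/programiranje3fon/labs2018 | lab2.py | compare_reversed
-- ===== SOURCE A (Python) =====
-- def compare_reversed(str1, str2):
--     str1_alnum = list()
--     for ch in str1:
--         if ch.isalnum(): str1_alnum.append(ch.lower())
--     str2_rev_alnum = list()
--     for ch in reversed(str2):
--         if ch.isalnum(): str2_rev_alnum.append(ch.lower())
--     return str1_alnum == str2_rev_alnum
-- ===== SOURCE B (Python) =====
-- def compare_reversed(str1, str2):
--     # Two-pointer walk: i forward over str1, j backward over str2;
--     # no intermediate lists are built.
--     i, j = 0, len(str2) - 1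
--     while True:
--         if i < len(str1) and not str1[i].isalnum():
--             i += 1
--             continue
--         if j >= 0 and not str2[j].isalnum():
--             j -= 1
--             continue
--         if i >= len(str1) or j < 0:
--             return i >= len(str1) and j < 0
--         if str1[i].lower() != str2[j].lower():
--             return False
--         i += 1
--         j -= 1
-- ===== Notes on version B (the rewrite author's own statement) =====
-- stated objective: alternative
-- what changed: Replaces building two filtered/lowercased lists and comparing them with a fused two-pointer walk (i forward over str1, j backward over str2) that skips non-alphanumerics in place and returns False at the first mismatch, never materialising an intermediate list.
import Mathlib
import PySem

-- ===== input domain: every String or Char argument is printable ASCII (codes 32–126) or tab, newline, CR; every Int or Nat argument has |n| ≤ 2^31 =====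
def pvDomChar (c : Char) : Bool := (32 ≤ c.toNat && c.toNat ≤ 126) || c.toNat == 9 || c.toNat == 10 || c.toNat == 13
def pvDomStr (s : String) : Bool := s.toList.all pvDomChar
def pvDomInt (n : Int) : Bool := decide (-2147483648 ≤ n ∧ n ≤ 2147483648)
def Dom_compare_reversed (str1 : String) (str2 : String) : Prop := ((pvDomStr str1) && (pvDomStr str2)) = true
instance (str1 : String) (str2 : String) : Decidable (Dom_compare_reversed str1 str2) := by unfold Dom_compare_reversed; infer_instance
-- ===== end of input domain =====

-- B replaces A's two materialised filtered lists with a fused two-pointer walk over both strings (alternative decomposition, O(1) extra space, early exit on mismatch).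

-- ===== PORT A =====
def compare_reversed (str1 : String) (str2 : String) : Bool :=
  let str1_alnum : List Char :=
    str1.toList.foldl
      (fun acc ch => if PySem.Chars.isalnum ch then acc ++ [PySem.Chars.lowerChar ch] else acc) []
  let str2_rev_alnum : List Char :=
    str2.toList.reverse.foldl
      (fun acc ch => if PySem.Chars.isalnum ch then acc ++ [PySem.Chars.lowerChar ch] else acc) []
  str1_alnum == str2_rev_alnum

-- ===== PORT B =====
-- the while-True loop of Source B; i, j are the two cursors (in range whenever read, by the guards);
-- fuel is only a structural-termination guard: one loop iteration consumes one unit, and the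
-- initial fuel len(str1)+len(str2)+1 strictly exceeds the iteration count, so 0 is never reached.
def crGo (l1 l2 : List Char) : Nat → Nat → Int → Bool
  | 0, _, _ => false
  | fuel + 1, i, j =>
    if i < l1.length ∧ PySem.Chars.isalnum (l1.getD i ' ') = false then
      crGo l1 l2 fuel (i + 1) j
    else if 0 ≤ j ∧ PySem.Chars.isalnum (l2.getD j.toNat ' ') = false then
      crGo l1 l2 fuel i (j - 1)
    else if l1.length ≤ i ∨ j < 0 then
      decide (l1.length ≤ i ∧ j < 0)
    else if PySem.Chars.lowerChar (l1.getD i ' ') ≠ PySem.Chars.lowerChar (l2.getD j.toNat ' ') then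
      false
    else
      crGo l1 l2 fuel (i + 1) (j - 1)

def compare_reversed_alt (str1 : String) (str2 : String) : Bool :=
  crGo str1.toList str2.toList (str1.toList.length + str2.toList.length + 1) 0
    ((str2.toList.length : Int) - 1)

-- ===== PRECONDITION & SPEC =====
def Spec_compare_reversed (str1 : String) (str2 : String) (out : Bool) : Prop := out = compare_reversed_alt str1 str2
instance (str1 : String) (str2 : String) (out : Bool) : Decidable (Spec_compare_reversed str1 str2 out) := by unfold Spec_compare_reversed; infer_instance

-- ===== CLAIM (what is proved, stated in full; the proofs are below) =====
def Claim_equal_compare_reversed : Prop := ∀ (str1 : String) (str2 : String), Dom_compare_reversed str1 str2 → Spec_compare_reversed str1 str2 (compare_reversed str1 str2)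

-- ===== LEMMAS AND PROOFS =====

-- the filtered-and-lowercased view both programs compute
def fA (l : List Char) : List Char := (l.filter PySem.Chars.isalnum).map PySem.Chars.lowerChar

theorem fA_nil : fA [] = [] := rfl

theorem fA_append (xs ys : List Char) : fA (xs ++ ys) = fA xs ++ fA ys := by
  simp [fA]

theorem fA_cons_neg (c : Char) (xs : List Char) (h : PySem.Chars.isalnum c = false) :
    fA (c :: xs) = fA xs := by
  simp [fA, h]

theorem fA_cons_pos (c : Char) (xs : List Char) (h : PySem.Chars.isalnum c = true) :
    fA (c :: xs) = PySem.Chars.lowerChar c :: fA xs := by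
  simp [fA, h]

theorem take_succ_get (l : List Char) (n : Nat) (h : n < l.length) :
    l.take (n + 1) = l.take n ++ [l[n]] := by
  rw [List.take_add_one, List.getElem?_eq_getElem h]; rfl

theorem alnum_of_not_guard1 (l1 : List Char) (i : Nat) (hi : i < l1.length)
    (h1 : ¬(i < l1.length ∧ PySem.Chars.isalnum (l1.getD i ' ') = false)) :
    PySem.Chars.isalnum (l1[i]) = true := by
  have hget : l1.getD i ' ' = l1[i] := List.getD_eq_getElem _ _ hi
  rcases Bool.eq_false_or_eq_true (PySem.Chars.isalnum (l1[i])) with h | h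
  · exact h
  · exact absurd ⟨hi, hget ▸ h⟩ h1

theorem alnum_of_not_guard2 (l2 : List Char) (j : Int) (hj0 : 0 ≤ j)
    (hjl : j.toNat < l2.length)
    (h2 : ¬(0 ≤ j ∧ PySem.Chars.isalnum (l2.getD j.toNat ' ') = false)) :
    PySem.Chars.isalnum (l2[j.toNat]) = true := by
  have hget : l2.getD j.toNat ' ' = l2[j.toNat] := List.getD_eq_getElem _ _ hjl
  rcases Bool.eq_false_or_eq_true (PySem.Chars.isalnum (l2[j.toNat])) with h | h
  · exact h
  · exact absurd ⟨hj0, hget ▸ h⟩ h2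

theorem crGo_eq (l1 l2 : List Char) (fuel : Nat) : ∀ (i : Nat) (j : Int),
    l1.length - i + (j + 1).toNat < fuel → -1 ≤ j → j < (l2.length : Int) →
    crGo l1 l2 fuel i j = (fA (l1.drop i) == (fA (l2.take (j + 1).toNat)).reverse) := by
  induction fuel with
  | zero => intro i j hf _ _; omega
  | succ fuel ih =>
    intro i j hf hj1 hj2
    rw [crGo]
    by_cases h1 : i < l1.length ∧ PySem.Chars.isalnum (l1.getD i ' ') = false
    · rw [if_pos h1, ih (i + 1) j (by omega) hj1 hj2]
      have hdrop : l1.drop i = l1[i] :: l1.drop (i + 1) := List.drop_eq_getElem_cons h1.1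
      have hget : l1.getD i ' ' = l1[i] := List.getD_eq_getElem _ _ h1.1
      rw [hdrop, fA_cons_neg _ _ (hget ▸ h1.2)]
    rw [if_neg h1]
    by_cases h2 : 0 ≤ j ∧ PySem.Chars.isalnum (l2.getD j.toNat ' ') = false
    · have hjl : j.toNat < l2.length := by omega
      have hT : (j + 1).toNat = j.toNat + 1 := by omega
      have hT' : (j - 1 + 1).toNat = j.toNat := by omega
      have hget : l2.getD j.toNat ' ' = l2[j.toNat] := List.getD_eq_getElem _ _ hjl
      rw [if_pos h2, ih i (j - 1) (by omega) (by omega) (by omega), hT, hT',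
          take_succ_get _ _ hjl, fA_append, fA_cons_neg _ _ (hget ▸ h2.2), fA_nil,
          List.append_nil]
    rw [if_neg h2]
    by_cases h3 : l1.length ≤ i ∨ j < 0
    · rw [if_pos h3]
      rcases h3 with hle | hneg
      · have hdrop : l1.drop i = [] := List.drop_eq_nil_of_le hle
        by_cases hj : j < 0
        · have : j = -1 := by omega
          subst this
          simp [hdrop, fA_nil, hle]
        · have hjl : j.toNat < l2.length := by omega
          have halnum := alnum_of_not_guard2 l2 j (by omega) hjl h2
          have hT : (j + 1).toNat = j.toNat + 1 := by omega
          rw [hT, take_succ_get _ _ hjl, fA_append, fA_cons_pos _ _ halnum, fA_nil]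
          simp [hdrop, fA_nil, hj, hle]
      · have : j = -1 := by omega
        subst this
        by_cases hi : i < l1.length
        · have halnum := alnum_of_not_guard1 l1 i hi h1
          have hdrop : l1.drop i = l1[i] :: l1.drop (i + 1) := List.drop_eq_getElem_cons hi
          rw [hdrop, fA_cons_pos _ _ halnum]
          have hni : ¬ l1.length ≤ i := by omega
          simp [hni, fA_nil]
        · have hdrop : l1.drop i = [] := List.drop_eq_nil_of_le (by omega)
          simp [hdrop, fA_nil]
          omega
    rw [if_neg h3]
    have hi : i < l1.length := by omega
    have hj0 : 0 ≤ j := by omega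
    have hjl : j.toNat < l2.length := by omega
    have hget1 : l1.getD i ' ' = l1[i] := List.getD_eq_getElem _ _ hi
    have hget2 : l2.getD j.toNat ' ' = l2[j.toNat] := List.getD_eq_getElem _ _ hjl
    have ha1 := alnum_of_not_guard1 l1 i hi h1
    have ha2 := alnum_of_not_guard2 l2 j hj0 hjl h2
    have hdrop : l1.drop i = l1[i] :: l1.drop (i + 1) := List.drop_eq_getElem_cons hi
    have hT : (j + 1).toNat = j.toNat + 1 := by omega
    by_cases h4 : PySem.Chars.lowerChar (l1.getD i ' ') ≠ PySem.Chars.lowerChar (l2.getD j.toNat ' ')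
    · rw [if_pos h4, hdrop, fA_cons_pos _ _ ha1, hT, take_succ_get _ _ hjl, fA_append,
          fA_cons_pos _ _ ha2, fA_nil]
      have hne : PySem.Chars.lowerChar (l1[i]) ≠ PySem.Chars.lowerChar (l2[j.toNat]) := by
        rw [← hget1, ← hget2]; exact h4
      simp [beq_iff_eq, hne]
    · rw [if_neg h4]
      have heq : PySem.Chars.lowerChar (l1[i]) = PySem.Chars.lowerChar (l2[j.toNat]) := by
        have := not_not.mp h4
        rw [← hget1, ← hget2]; exact this
      have hT' : (j - 1 + 1).toNat = j.toNat := by omega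
      rw [ih (i + 1) (j - 1) (by omega) (by omega) (by omega), hT', hdrop,
          fA_cons_pos _ _ ha1, hT, take_succ_get _ _ hjl, fA_append, fA_cons_pos _ _ ha2,
          fA_nil]
      simp [heq]

-- ===== VERDICT (by name: the statement is the Claim_ definition above) =====
theorem compare_reversed_spec : Claim_equal_compare_reversed := by
  intro str1 str2 _
  unfold Spec_compare_reversed compare_reversed compare_reversed_alt
  rw [PySem.List.foldl_append_if, PySem.List.foldl_append_if]
  rw [crGo_eq _ _ _ _ _ (by omega) (by omega) (by omega)]
  have hT : ((str2.toList.length : Int) - 1 + 1).toNat = str2.toList.length := by omega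
  rw [hT, List.take_length, List.drop_zero]
  simp [fA, List.filter_reverse, List.map_reverse]
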